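-- pv_equiv track=rewrite | github.com/DavideBraga/master-degree-CS | masterDegree/FirstYear/SecondSemestr/ComplessitàAlgoritmi/rtal/resolved/poldo_mania/poldo_mania_medium_result.py | subseqcres
-- ===== SOURCE A (Python) =====
-- def subseqcres(array):
--     res = [1 for _ in range(len(array))]
--     pel = [1 for _ in range(len(array))]
--     for i in range((len(array) - 1), -1, -1):
--         for j in range (i, len(array), 1):
--             if array[j] > array[i]:
--                 res[i] = max(res[i], res[j] + 1)
--
--     for i in range(len(array)):
--         for j in range(i):
--             if array[j] < array[i]:
--                 pel[i] = max(pel[i], pel[j] + 1)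
--
--     for i in range(len(array)):
--         pel[i] += res[i] - 1
--
--     return pel
-- ===== SOURCE B (Python) =====
-- def _lis_end(a):
--     # patience sorting: tails[k] = smallest tail of a strictly increasing
--     # subsequence of length k+1 seen so far; dp value = insertion point + 1
--     tails = []
--     out = []
--     for x in a:
--         lo, hi = 0, len(tails)
--         while lo < hi:
--             mid = (lo + hi) // 2
--             if tails[mid] < x:
--                 lo = mid + 1
--             else:
--                 hi = mid
--         if lo == len(tails):
--             tails.append(x)
--         else:
--             tails[lo] = x
--         out.append(lo + 1)
--     return out
--
--
-- def subseqcres(array):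
--     left = _lis_end(array)
--     right = _lis_end([-x for x in reversed(array)])
--     right.reverse()
--     return [l + r - 1 for l, r in zip(left, right)]
-- ===== Notes on version B (the rewrite author's own statement) =====
-- stated objective: faster
-- what changed: Replaces A's two quadratic dynamic-programming loop nests with patience sorting: a sorted 'tails' list updated via binary search gives the LIS-length ending at each element, run once left-to-right and once over the reversed negated list for the rightward part.
import Mathlib
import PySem

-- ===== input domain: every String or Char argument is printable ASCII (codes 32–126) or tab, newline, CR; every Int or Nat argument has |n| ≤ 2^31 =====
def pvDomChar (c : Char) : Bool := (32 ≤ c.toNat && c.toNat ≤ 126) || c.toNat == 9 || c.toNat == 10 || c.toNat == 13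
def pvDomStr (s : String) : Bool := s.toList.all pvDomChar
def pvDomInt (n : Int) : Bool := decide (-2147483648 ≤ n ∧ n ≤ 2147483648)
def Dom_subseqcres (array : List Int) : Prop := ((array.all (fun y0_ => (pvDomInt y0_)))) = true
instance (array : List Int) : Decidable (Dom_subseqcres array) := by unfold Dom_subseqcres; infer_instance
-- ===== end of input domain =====

-- B replaces A's quadratic DP with patience sorting (a 'tails' list updated by
-- binary search), run left-to-right and again on the reversed, negated list.

-- ===== PORT A =====
-- literal transliteration of A's three loop nests; list indices are always in
-- range (they come from range(...) over the list's own length), so getD/set are exact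
def subseqcres (array : List Int) : List Int :=
  let n := array.length
  let res0 : List Int := List.replicate n 1
  let pel0 : List Int := List.replicate n 1
  let res := (List.range n).reverse.foldl (fun res i =>
      (List.range' i (n - i)).foldl (fun res j =>
        if array.getD i 0 < array.getD j 0 then
          res.set i (max (res.getD i 0) (res.getD j 0 + 1))
        else res) res) res0
  let pel := (List.range n).foldl (fun pel i =>
      (List.range i).foldl (fun pel j =>
        if array.getD j 0 < array.getD i 0 then
          pel.set i (max (pel.getD i 0) (pel.getD j 0 + 1))
        else pel) pel) pel0
  (List.range n).foldl (fun pel i => pel.set i (pel.getD i 0 + res.getD i 0 - 1)) pel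

-- ===== PORT B =====
-- bisect: Python's while lo < hi loop, step for step
def bisectLoop (tails : List Int) (x : Int) (lo hi : Nat) : Nat :=
  if _h : lo < hi then
    let mid := (lo + hi) / 2
    if tails.getD mid 0 < x then bisectLoop tails x (mid + 1) hi
    else bisectLoop tails x lo mid
  else lo
termination_by hi - lo
decreasing_by all_goals omega

def lisEnd (a : List Int) : List Int :=
  (a.foldl (fun (st : List Int × List Int) x =>
    let tails := st.1
    let pos := bisectLoop tails x 0 tails.length
    let tails' := if pos = tails.length then tails ++ [x] else tails.set pos x
    (tails', st.2 ++ [(pos : Int) + 1])) ([], [])).2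

def subseqcres_alt (array : List Int) : List Int :=
  let left := lisEnd array
  let right := (lisEnd (array.reverse.map (fun x => -x))).reverse
  List.zipWith (fun l r => l + r - 1) left right

-- ===== PRECONDITION & SPEC =====
def Spec_subseqcres (array : List Int) (out : List Int) : Prop := out = subseqcres_alt array
instance (array : List Int) (out : List Int) : Decidable (Spec_subseqcres array out) := by unfold Spec_subseqcres; infer_instance

-- ===== CLAIM (what is proved, stated in full; the proofs are below) =====
def Claim_equal_subseqcres : Prop := ∀ (array : List Int), Dom_subseqcres array → Spec_subseqcres array (subseqcres array)

-- ===== LEMMAS AND PROOFS =====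

-- the common mathematical spec: dp value of each element given the history acc
-- of (value, dp) pairs to its left
def maxUnder (acc : List (Int × Int)) (x : Int) : Int :=
  acc.foldl (fun m p => if p.1 < x then max m p.2 else m) 0

def dpAux : List Int → List (Int × Int) → List Int
  | [], _ => []
  | x :: xs, acc => (maxUnder acc x + 1) :: dpAux xs (acc ++ [(x, maxUnder acc x + 1)])

def dpList (a : List Int) : List Int := dpAux a []

def maxOverGT (pairs : List (Int × Int)) (x : Int) : Int :=
  pairs.foldl (fun m p => if x < p.1 then max m p.2 else m) 0

def resSpec : List Int → List Int
  | [] => []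
  | x :: xs => (maxOverGT (xs.zip (resSpec xs)) x + 1) :: resSpec xs

def maxD (acc : List (Int × Int)) : Int := acc.foldl (fun m p => max m p.2) 0

def PatInv (acc : List (Int × Int)) (tails : List Int) : Prop :=
  tails.Pairwise (· < ·) ∧
  (∀ p ∈ acc, 1 ≤ p.2) ∧
  (tails.length : Int) = maxD acc ∧
  ∀ k : Nat, k < tails.length →
    ((∃ p ∈ acc, p.2 = (k : Int) + 1 ∧ p.1 = tails.getD k 0) ∧
     (∀ p ∈ acc, (k : Int) + 1 ≤ p.2 → tails.getD k 0 ≤ p.1))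

-- generic lemmas about conditional fold-max
def fmax (c : Int × Int → Bool) (l : List (Int × Int)) : Int :=
  l.foldl (fun m p => if c p then max m p.2 else m) 0

theorem fmax_main (c : Int × Int → Bool) (l : List (Int × Int)) :
    0 ≤ fmax c l ∧ ∀ m : Int, 0 ≤ m →
      l.foldl (fun m p => if c p then max m p.2 else m) m = max m (fmax c l) := by
  induction l with
  | nil => refine ⟨le_refl 0, fun m hm => ?_⟩; simp [fmax]; omega
  | cons p l ih =>
    obtain ⟨hn, hi⟩ := ih
    have hstep : ∀ m : Int, 0 ≤ m → (if c p then max m p.2 else m) ≥ 0 := by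
      intro m hm; split <;> omega
    have hc : fmax c (p :: l) = max (if c p then max 0 p.2 else 0) (fmax c l) := by
      simp only [fmax, List.foldl_cons]
      exact hi _ (hstep 0 le_rfl)
    constructor
    · rw [hc]; split <;> omega
    · intro m hm
      simp only [List.foldl_cons]
      rw [hi _ (hstep m hm), hc]
      split <;> omega

theorem fmax_nonneg (c : Int × Int → Bool) (l : List (Int × Int)) : 0 ≤ fmax c l :=
  (fmax_main c l).1

theorem fmax_cons (c : Int × Int → Bool) (p : Int × Int) (l : List (Int × Int)) :
    fmax c (p :: l) = max (if c p then max 0 p.2 else 0) (fmax c l) := by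
  simp only [fmax, List.foldl_cons]
  exact (fmax_main c l).2 _ (by split <;> omega)

theorem fmax_append (c : Int × Int → Bool) (l₁ l₂ : List (Int × Int)) :
    fmax c (l₁ ++ l₂) = max (fmax c l₁) (fmax c l₂) := by
  simp only [fmax, List.foldl_append]
  exact (fmax_main c l₂).2 _ (fmax_nonneg c l₁)

theorem fmax_ge (c : Int × Int → Bool) {l : List (Int × Int)} {p : Int × Int}
    (hp : p ∈ l) (hc : c p = true) : p.2 ≤ fmax c l := by
  induction l with
  | nil => simp at hp
  | cons q l ih =>
    rcases List.mem_cons.mp hp with h | h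
    · subst h
      rw [fmax_cons, if_pos hc]
      have := fmax_nonneg c l
      omega
    · rw [fmax_cons]
      have := ih h
      omega

theorem fmax_le (c : Int × Int → Bool) {l : List (Int × Int)} {M : Int}
    (hM : 0 ≤ M) (h : ∀ p ∈ l, c p = true → p.2 ≤ M) : fmax c l ≤ M := by
  induction l with
  | nil => simpa [fmax]
  | cons q l ih =>
    rw [fmax_cons]
    have h2 := ih (fun p hp => h p (List.mem_cons_of_mem _ hp))
    by_cases hc : c q = true
    · have h1 := h q (by simp) hc
      rw [if_pos hc]
      omega
    · rw [if_neg hc]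
      omega

theorem fmax_attained (c : Int × Int → Bool) {l : List (Int × Int)}
    (h : 1 ≤ fmax c l) : ∃ p ∈ l, c p = true ∧ p.2 = fmax c l := by
  induction l with
  | nil => simp [fmax] at h
  | cons q l ih =>
    have hn := fmax_nonneg c l
    rw [fmax_cons] at h ⊢
    by_cases hq : c q = true
    · rw [if_pos hq] at h ⊢
      by_cases hle : fmax c l < max 0 q.2
      · exact ⟨q, by simp, hq, by omega⟩
      · obtain ⟨p, hp, hcp, hv⟩ := ih (by omega)
        exact ⟨p, List.mem_cons_of_mem _ hp, hcp, by omega⟩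
    · rw [if_neg hq] at h ⊢
      obtain ⟨p, hp, hcp, hv⟩ := ih (by omega)
      exact ⟨p, List.mem_cons_of_mem _ hp, hcp, by omega⟩

theorem fmax_reverse (c : Int × Int → Bool) (l : List (Int × Int)) :
    fmax c l.reverse = fmax c l := by
  induction l with
  | nil => rfl
  | cons p l ih =>
    have h1 : fmax c [p] = if c p then max 0 p.2 else 0 := by simp [fmax]
    rw [List.reverse_cons, fmax_append, ih, h1, fmax_cons]
    exact max_comm _ _

theorem fmax_map (c : Int × Int → Bool) (h : Int × Int → Int × Int)
    (hsnd : ∀ p, (h p).2 = p.2) (l : List (Int × Int)) :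
    fmax c (l.map h) = fmax (fun p => c (h p)) l := by
  induction l with
  | nil => rfl
  | cons p l ih => rw [List.map_cons, fmax_cons, fmax_cons (fun p => c (h p)), ih, hsnd]

-- bridges from the named spec folds to fmax
theorem maxUnder_eq_fmax (acc : List (Int × Int)) (x : Int) :
    maxUnder acc x = fmax (fun p => decide (p.1 < x)) acc := by
  simp [maxUnder, fmax]

theorem maxOverGT_eq_fmax (l : List (Int × Int)) (x : Int) :
    maxOverGT l x = fmax (fun p => decide (x < p.1)) l := by
  simp [maxOverGT, fmax]

theorem maxD_eq_fmax (acc : List (Int × Int)) :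
    maxD acc = fmax (fun _ => true) acc := by
  simp [maxD, fmax]

theorem maxUnder_nonneg (acc : List (Int × Int)) (x : Int) : 0 ≤ maxUnder acc x := by
  rw [maxUnder_eq_fmax]; exact fmax_nonneg _ _

theorem maxUnder_le_maxD (acc : List (Int × Int)) (x : Int) : maxUnder acc x ≤ maxD acc := by
  rw [maxUnder_eq_fmax, maxD_eq_fmax]
  exact fmax_le _ (fmax_nonneg _ _) (fun p hp _ => fmax_ge _ hp rfl)

theorem maxUnder_ge (acc : List (Int × Int)) (x : Int) {p : Int × Int} (hp : p ∈ acc)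
    (hlt : p.1 < x) : p.2 ≤ maxUnder acc x := by
  rw [maxUnder_eq_fmax]; exact fmax_ge _ hp (by simpa)

theorem maxD_ge (acc : List (Int × Int)) {p : Int × Int} (hp : p ∈ acc) : p.2 ≤ maxD acc := by
  rw [maxD_eq_fmax]; exact fmax_ge _ hp rfl

theorem maxUnder_attained (acc : List (Int × Int)) (x : Int) (h : 1 ≤ maxUnder acc x) :
    ∃ p ∈ acc, p.1 < x ∧ p.2 = maxUnder acc x := by
  rw [maxUnder_eq_fmax] at h ⊢
  obtain ⟨p, hp, hc, hv⟩ := fmax_attained _ h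
  exact ⟨p, hp, by simpa using hc, hv⟩

theorem maxUnder_append (acc₁ acc₂ : List (Int × Int)) (x : Int) :
    maxUnder (acc₁ ++ acc₂) x = max (maxUnder acc₁ x) (maxUnder acc₂ x) := by
  simp [maxUnder_eq_fmax, fmax_append]

-- getD helpers
theorem getD_append_left {l₁ l₂ : List Int} {k : Nat} (h : k < l₁.length) (d : Int) :
    (l₁ ++ l₂).getD k d = l₁.getD k d := by
  simp [List.getD, List.getElem?_append_left h]

theorem getD_append_right {l₁ l₂ : List Int} {k : Nat} (h : l₁.length ≤ k) (d : Int) :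
    (l₁ ++ l₂).getD k d = l₂.getD (k - l₁.length) d := by
  simp [List.getD, List.getElem?_append_right h]

theorem getD_set_self {l : List Int} {p : Nat} (h : p < l.length) (x d : Int) :
    (l.set p x).getD p d = x := by
  simp [List.getD, List.getElem?_set_self, h]

theorem getD_set_ne {l : List Int} {p k : Nat} (h : k ≠ p) (x d : Int) :
    (l.set p x).getD k d = l.getD k d := by
  simp [List.getD, List.getElem?_set_ne (by omega : p ≠ k)]

theorem getD_snoc_self (l : List Int) (x : Int) : (l ++ [x]).getD l.length 0 = x := by
  rw [getD_append_right le_rfl]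
  simp [List.getD]

theorem pairwise_lt_getD {l : List Int} (h : l.Pairwise (· < ·)) {i j : Nat}
    (hij : i < j) (hj : j < l.length) : l.getD i 0 < l.getD j 0 := by
  rw [List.pairwise_iff_getElem] at h
  have := h i j (by omega) hj hij
  simp [List.getD, List.getElem?_eq_getElem, hj, (by omega : i < l.length)]
  simpa [List.getElem?_eq_getElem, hj, (by omega : i < l.length)] using this

theorem getD_of_lt {l : List Int} {k : Nat} (h : k < l.length) : l.getD k 0 = l[k] := by
  simp [List.getD, List.getElem?_eq_getElem, h]

theorem pairwise_lt_of_getD {l : List Int}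
    (h : ∀ i j : Nat, i < j → j < l.length → l.getD i 0 < l.getD j 0) :
    l.Pairwise (· < ·) := by
  rw [List.pairwise_iff_getElem]
  intro i j hi hj hij
  have := h i j hij hj
  rwa [getD_of_lt (by omega), getD_of_lt hj] at this

theorem maxD_append_single (acc : List (Int × Int)) (p : Int × Int) (hp : 0 ≤ p.2) :
    maxD (acc ++ [p]) = max (maxD acc) p.2 := by
  rw [maxD_eq_fmax, maxD_eq_fmax, fmax_append, fmax_cons]
  simp [fmax]; omega

theorem bisectLoop_step (l : List Int) (x : Int) (lo hi : Nat) (h : lo < hi) :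
    bisectLoop l x lo hi =
      if l.getD ((lo + hi) / 2) 0 < x then bisectLoop l x ((lo + hi) / 2 + 1) hi
      else bisectLoop l x lo ((lo + hi) / 2) := by
  rw [bisectLoop]; simp [h]

theorem bisectLoop_stop (l : List Int) (x : Int) (lo hi : Nat) (h : ¬ lo < hi) :
    bisectLoop l x lo hi = lo := by
  rw [bisectLoop]; simp [h]

theorem bisect_core (l : List Int) (x : Int) (hs : l.Pairwise (· < ·)) :
    ∀ (n lo hi : Nat), hi - lo = n → lo ≤ hi → hi ≤ l.length →
    (∀ k, k < lo → l.getD k 0 < x) →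
    (∀ k, hi ≤ k → k < l.length → ¬ l.getD k 0 < x) →
    (∀ k, k < bisectLoop l x lo hi → l.getD k 0 < x) ∧
    (∀ k, bisectLoop l x lo hi ≤ k → k < l.length → ¬ l.getD k 0 < x) ∧
    bisectLoop l x lo hi ≤ l.length := by
  intro n
  induction n using Nat.strong_induction_on with
  | _ n ih =>
    intro lo hi hn hlh hhl hlo hhi
    by_cases h : lo < hi
    · rw [bisectLoop_step l x lo hi h]
      have hmid1 : lo ≤ (lo + hi) / 2 := by omega
      have hmid2 : (lo + hi) / 2 < hi := by omega
      by_cases hc : l.getD ((lo + hi) / 2) 0 < x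
      · rw [if_pos hc]
        refine ih (hi - ((lo + hi) / 2 + 1)) (by omega) _ _ rfl (by omega) hhl ?_ hhi
        intro k hk
        rcases Nat.lt_or_ge k ((lo + hi) / 2) with hkm | hkm
        · exact lt_trans (pairwise_lt_getD hs hkm (by omega)) hc
        · have : k = (lo + hi) / 2 := by omega
          rwa [this]
      · rw [if_neg hc]
        refine ih ((lo + hi) / 2 - lo) (by omega) _ _ rfl (by omega) (by omega) hlo ?_
        intro k hk hkl
        rcases Nat.lt_or_ge ((lo + hi) / 2) k with hkm | hkm
        · have := pairwise_lt_getD hs hkm (by omega)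
          omega
        · have : k = (lo + hi) / 2 := by omega
          rwa [this]
    · rw [bisectLoop_stop l x lo hi h]
      have : lo = hi := by omega
      subst this
      exact ⟨hlo, hhi, hhl⟩

theorem bisect_correct (tails : List Int) (x : Int) (hs : tails.Pairwise (· < ·)) :
    (∀ k, k < bisectLoop tails x 0 tails.length → tails.getD k 0 < x) ∧
    (∀ k, bisectLoop tails x 0 tails.length ≤ k → k < tails.length → ¬ tails.getD k 0 < x) ∧
    bisectLoop tails x 0 tails.length ≤ tails.length :=
  bisect_core tails x hs _ 0 tails.length rfl (Nat.zero_le _) le_rfl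
    (fun k hk => absurd hk (Nat.not_lt_zero k)) (fun k hk hkl => by omega)

theorem inv_iff {acc : List (Int × Int)} {tails : List Int} (h : PatInv acc tails) (x : Int) :
    ∀ k : Nat, k < tails.length → (tails.getD k 0 < x ↔ (k : Int) < maxUnder acc x) := by
  obtain ⟨hs, hdp, hlen, hk⟩ := h
  intro k hklen
  constructor
  · intro hlt
    obtain ⟨⟨p, hp, hp2, hp1⟩, _⟩ := hk k hklen
    have := maxUnder_ge acc x hp (by omega)
    omega
  · intro hlt
    have h1 : 1 ≤ maxUnder acc x := by
      have : (0 : Int) ≤ (k : Int) := Int.natCast_nonneg k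
      omega
    obtain ⟨p, hp, hpx, hpv⟩ := maxUnder_attained acc x h1
    have := (hk k hklen).2 p hp (by omega)
    omega

theorem inv_count {acc : List (Int × Int)} {tails : List Int} (h : PatInv acc tails) (x : Int) :
    (bisectLoop tails x 0 tails.length : Int) = maxUnder acc x := by
  obtain ⟨h1, h2, h3⟩ := bisect_correct tails x h.1
  have hiff := inv_iff h x
  have hM0 := maxUnder_nonneg acc x
  have hMlen : maxUnder acc x ≤ (tails.length : Int) := h.2.2.1 ▸ maxUnder_le_maxD acc x
  set r := bisectLoop tails x 0 tails.length with hr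
  rcases lt_trichotomy ((r : Int)) (maxUnder acc x) with hlt | heq | hgt
  · exfalso
    have hrlen : r < tails.length := by omega
    have := (hiff r hrlen).mpr hlt
    exact h2 r le_rfl hrlen this
  · exact heq
  · exfalso
    set m := (maxUnder acc x).toNat with hm
    have hmc : (m : Int) = maxUnder acc x := Int.toNat_of_nonneg hM0
    have hmr : m < r := by omega
    have hmlen : m < tails.length := by omega
    have := h1 m hmr
    have := (hiff m hmlen).mp this
    omega

theorem inv_step {acc : List (Int × Int)} {tails : List Int} (h : PatInv acc tails) (x : Int) :
    PatInv (acc ++ [(x, maxUnder acc x + 1)])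
      (if bisectLoop tails x 0 tails.length = tails.length then tails ++ [x]
       else tails.set (bisectLoop tails x 0 tails.length) x) := by
  obtain ⟨hb1, hb2, hb3⟩ := bisect_correct tails x h.1
  have hr := inv_count h x
  have hM0 := maxUnder_nonneg acc x
  obtain ⟨hs, hdp, hlen, hk⟩ := h
  set M := maxUnder acc x with hMdef
  set r := bisectLoop tails x 0 tails.length with hrdef
  have hmaxD' : maxD (acc ++ [(x, M + 1)]) = max (maxD acc) (M + 1) :=
    maxD_append_single acc (x, M + 1) (by simp; omega)
  have hdp' : ∀ p ∈ acc ++ [(x, M + 1)], 1 ≤ p.2 := by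
    intro p hp
    rcases List.mem_append.mp hp with h' | h'
    · exact hdp p h'
    · simp at h'; subst h'; simp; omega
  by_cases hcase : r = tails.length
  · rw [if_pos hcase]
    have hMn : M = (tails.length : Int) := by omega
    refine ⟨?_, hdp', ?_, ?_⟩
    · apply pairwise_lt_of_getD
      intro i j hij hj
      simp only [List.length_append, List.length_singleton] at hj
      rcases Nat.lt_or_ge j tails.length with hjn | hjn
      · rw [getD_append_left (by omega), getD_append_left (by omega)]
        exact pairwise_lt_getD hs hij hjn
      · have hj' : j = tails.length := by omega
        rw [hj', getD_snoc_self, getD_append_left (by omega)]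
        exact hb1 i (by omega)
    · rw [hmaxD', ← hlen]
      simp only [List.length_append, List.length_singleton]
      push_cast
      omega
    · intro k hklen
      simp only [List.length_append, List.length_singleton] at hklen
      rcases Nat.lt_or_ge k tails.length with hkn | hkn
      · rw [getD_append_left (by omega)]
        obtain ⟨⟨p, hp, hp2, hp1⟩, hmin⟩ := hk k hkn
        refine ⟨⟨p, List.mem_append_left _ hp, hp2, hp1⟩, ?_⟩
        intro p hp hle
        rcases List.mem_append.mp hp with h' | h'
        · exact hmin p h' hle
        · simp at h'; subst h'
          exact le_of_lt (hb1 k (by omega))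
      · have hk' : k = tails.length := by omega
        subst hk'
        rw [getD_snoc_self]
        refine ⟨⟨(x, M + 1), List.mem_append_right _ (by simp), by simp; omega, by simp⟩, ?_⟩
        intro p hp hle
        rcases List.mem_append.mp hp with h' | h'
        · exfalso
          have := maxD_ge acc h'
          omega
        · simp at h'; subst h'; simp
  · rw [if_neg hcase]
    have hrn : r < tails.length := by omega
    have hxr : ¬ tails.getD r 0 < x := hb2 r le_rfl hrn
    refine ⟨?_, hdp', ?_, ?_⟩
    · apply pairwise_lt_of_getD
      intro i j hij hj
      simp only [List.length_set] at hj
      rcases eq_or_ne i r with hir | hir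
      · subst hir
        rw [getD_set_self (by omega), getD_set_ne (by omega)]
        have := pairwise_lt_getD hs hij hj
        omega
      · rw [getD_set_ne hir]
        rcases eq_or_ne j r with hjr | hjr
        · subst hjr
          rw [getD_set_self (by omega)]
          exact hb1 i hij
        · rw [getD_set_ne hjr]
          exact pairwise_lt_getD hs hij (by omega)
    · rw [hmaxD', ← hlen]
      simp only [List.length_set]
      omega
    · intro k hklen
      simp only [List.length_set] at hklen
      rcases eq_or_ne k r with hkr | hkr
      · subst hkr
        rw [getD_set_self (by omega)]
        refine ⟨⟨(x, M + 1), List.mem_append_right _ (by simp), by simp; omega, by simp⟩, ?_⟩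
        intro p hp hle
        rcases List.mem_append.mp hp with h' | h'
        · by_contra hlt
          have hlt' : p.1 < x := by omega
          have := maxUnder_ge acc x h' hlt'
          omega
        · simp at h'; subst h'; simp
      · rw [getD_set_ne hkr]
        obtain ⟨⟨p, hp, hp2, hp1⟩, hmin⟩ := hk k hklen
        refine ⟨⟨p, List.mem_append_left _ hp, hp2, hp1⟩, ?_⟩
        intro p hp hle
        rcases List.mem_append.mp hp with h' | h'
        · exact hmin p h' hle
        · simp at h'; subst h'
          simp only at hle ⊢
          have hkr' : k < r := by omega
          exact le_of_lt (hb1 k hkr')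

theorem patInv_nil : PatInv [] [] := by
  refine ⟨List.Pairwise.nil, by simp, by simp [maxD], by simp⟩

theorem lisEnd_loop (a : List Int) : ∀ (acc : List (Int × Int)) (tails out : List Int),
    PatInv acc tails →
    (a.foldl (fun (st : List Int × List Int) x =>
      let tails := st.1
      let pos := bisectLoop tails x 0 tails.length
      let tails' := if pos = tails.length then tails ++ [x] else tails.set pos x
      (tails', st.2 ++ [(pos : Int) + 1])) (tails, out)).2 = out ++ dpAux a acc := by
  induction a with
  | nil => intro acc tails out _; simp [dpAux]
  | cons x xs ih =>
    intro acc tails out h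
    have hpos := inv_count h x
    have hstep := inv_step h x
    simp only [List.foldl_cons]
    have := ih (acc ++ [(x, maxUnder acc x + 1)])
      (if bisectLoop tails x 0 tails.length = tails.length then tails ++ [x]
       else tails.set (bisectLoop tails x 0 tails.length) x)
      (out ++ [(bisectLoop tails x 0 tails.length : Int) + 1]) hstep
    simp only at this ⊢
    rw [this, dpAux, ← hpos]
    simp

theorem lisEnd_eq_dpList (a : List Int) : lisEnd a = dpList a := by
  have := lisEnd_loop a [] [] [] patInv_nil
  simpa [lisEnd, dpList] using this

-- ===== A-side lemmas: the three loop nests compute dpList / resSpec / zipWith =====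

theorem dpAux_length (a : List Int) : ∀ acc, (dpAux a acc).length = a.length := by
  induction a with
  | nil => intro acc; simp [dpAux]
  | cons x xs ih => intro acc; simp [dpAux, ih]

theorem dpAux_pos (a : List Int) : ∀ acc i, i < a.length → 1 ≤ (dpAux a acc).getD i 0 := by
  induction a with
  | nil => intro acc i h; simp at h
  | cons x xs ih =>
    intro acc i h
    cases i with
    | zero =>
      have := maxUnder_nonneg acc x
      simp [dpAux, List.getD]; omega
    | succ i =>
      simp only [dpAux, List.getD, List.getElem?_cons_succ]
      exact ih _ i (by simpa using h)

theorem resSpec_length (a : List Int) : (resSpec a).length = a.length := by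
  induction a with
  | nil => simp [resSpec]
  | cons x xs ih => simp [resSpec, ih]

theorem resSpec_pos (a : List Int) : ∀ i, i < a.length → 1 ≤ (resSpec a).getD i 0 := by
  induction a with
  | nil => intro i h; simp at h
  | cons x xs ih =>
    intro i h
    cases i with
    | zero =>
      have := fmax_nonneg (fun p => decide (x < p.1)) (xs.zip (resSpec xs))
      rw [← maxOverGT_eq_fmax] at this
      simp [resSpec, List.getD]; omega
    | succ i =>
      simp only [resSpec, List.getD, List.getElem?_cons_succ]
      exact ih i (by simpa using h)

theorem take_succ_getD {l : List Int} {m : Nat} (h : m < l.length) :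
    l.take (m + 1) = l.take m ++ [l.getD m 0] := by
  rw [List.take_succ, List.getElem?_eq_getElem h, getD_of_lt h]
  rfl

theorem set_append_len (l₁ : List Int) (y v : Int) (l₂ : List Int) :
    (l₁ ++ y :: l₂).set l₁.length v = l₁ ++ v :: l₂ := by
  induction l₁ with
  | nil => rfl
  | cons z l₁ ih => simp [List.set, ih]

theorem set_eq_self_of_getD {l : List Int} {i : Nat} {v : Int}
    (hi : i < l.length) (h : l.getD i 0 = v) : l.set i v = l := by
  apply List.ext_getElem (by simp)
  intro k hk1 hk2
  rcases eq_or_ne k i with hk | hk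
  · subst hk
    rw [List.getElem_set_self, ← h, getD_of_lt hi]
  · rw [List.getElem_set_ne (by omega)]

theorem getD_take {l : List Int} {m j : Nat} (h : j < m) :
    (l.take m).getD j 0 = l.getD j 0 := by
  simp [List.getD, List.getElem?_take, h]

theorem getD_drop {l : List Int} (k j : Nat) :
    (l.drop k).getD j 0 = l.getD (k + j) 0 := by
  simp [List.getD, List.getElem?_drop]

theorem getD_replicate {k j : Nat} (h : j < k) : (List.replicate k (1 : Int)).getD j 0 = 1 := by
  simp [List.getD, List.getElem?_replicate, h]

theorem dpAux_getD (a : List Int) : ∀ (acc : List (Int × Int)) (i : Nat), i < a.length →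
    (dpAux a acc).getD i 0 =
      maxUnder (acc ++ (a.take i).zip ((dpAux a acc).take i)) (a.getD i 0) + 1 := by
  induction a with
  | nil => intro acc i h; simp at h
  | cons x xs ih =>
    intro acc i h
    cases i with
    | zero => simp [dpAux, List.getD]
    | succ i =>
      have hx : (dpAux (x :: xs) acc) =
          (maxUnder acc x + 1) :: dpAux xs (acc ++ [(x, maxUnder acc x + 1)]) := rfl
      rw [hx]
      simp only [List.getD, List.getElem?_cons_succ, List.take_succ_cons, List.zip_cons_cons]
      have := ih (acc ++ [(x, maxUnder acc x + 1)]) i (by simpa using h)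
      simp only [List.getD] at this
      rw [this, List.append_assoc]
      rfl

theorem maxUnder_single (v d x : Int) : maxUnder [(v, d)] x = if v < x then max 0 d else 0 := by
  simp [maxUnder]

theorem maxOverGT_single (v d x : Int) : maxOverGT [(v, d)] x = if x < v then max 0 d else 0 := by
  simp [maxOverGT]

theorem maxOverGT_append (l₁ l₂ : List (Int × Int)) (x : Int) :
    maxOverGT (l₁ ++ l₂) x = max (maxOverGT l₁ x) (maxOverGT l₂ x) := by
  simp [maxOverGT_eq_fmax, fmax_append]

theorem set_append_len' (l₁ : List Int) (y v : Int) (l₂ : List Int) (n : Nat)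
    (h : n = l₁.length) : (l₁ ++ y :: l₂).set n v = l₁ ++ v :: l₂ := by
  subst h
  exact set_append_len l₁ y v l₂

-- the forward (pel) loop nest
theorem pel_inner (a : List Int) (i : Nat) :
    ∀ (m : Nat), m ≤ i → i < a.length → ∀ (pel : List Int), pel.length = a.length →
    pel.getD i 0 = 1 →
    (∀ j, j < i → pel.getD j 0 = (dpList a).getD j 0) →
    (List.range m).foldl (fun pel j =>
        if a.getD j 0 < a.getD i 0 then
          pel.set i (max (pel.getD i 0) (pel.getD j 0 + 1))
        else pel) pel
      = pel.set i (maxUnder ((a.take m).zip ((dpList a).take m)) (a.getD i 0) + 1) := by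
  intro m
  induction m with
  | zero =>
    intro _ hi pel hlen h1 _
    simp only [List.range_zero, List.foldl_nil, List.take_zero, List.zip_nil_left]
    rw [maxUnder, List.foldl_nil]
    exact (set_eq_self_of_getD (by omega) h1).symm
  | succ m ihm =>
    intro hmi hi pel hlen h1 hj
    have hDlen : (dpList a).length = a.length := dpAux_length a []
    have hm : m < a.length := by omega
    rw [List.range_succ, List.foldl_append, ihm (by omega) hi pel hlen h1 hj]
    simp only [List.foldl_cons, List.foldl_nil]
    have hgm : (pel.set i (maxUnder ((a.take m).zip ((dpList a).take m)) (a.getD i 0) + 1)).getD m 0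
        = (dpList a).getD m 0 := by
      rw [getD_set_ne (by omega), hj m (by omega)]
    have hgi : (pel.set i (maxUnder ((a.take m).zip ((dpList a).take m)) (a.getD i 0) + 1)).getD i 0
        = maxUnder ((a.take m).zip ((dpList a).take m)) (a.getD i 0) + 1 := by
      rw [getD_set_self (by omega)]
    have hzip : (a.take (m + 1)).zip ((dpList a).take (m + 1))
        = (a.take m).zip ((dpList a).take m) ++ [(a.getD m 0, (dpList a).getD m 0)] := by
      rw [take_succ_getD hm, take_succ_getD (by omega)]
      rw [List.zip_append (by simp <;> omega)]
      rfl
    have hpos : 1 ≤ (dpList a).getD m 0 := dpAux_pos a [] m hm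
    have hnn := maxUnder_nonneg ((a.take m).zip ((dpList a).take m)) (a.getD i 0)
    by_cases hc : a.getD m 0 < a.getD i 0
    · rw [if_pos hc, hgm, hgi, List.set_set, hzip, maxUnder_append, maxUnder_single, if_pos hc]
      exact congrArg (List.set pel i) (by omega)
    · rw [if_neg hc, hzip, maxUnder_append, maxUnder_single, if_neg hc]
      exact congrArg (List.set pel i) (by omega)

theorem pel_outer (a : List Int) :
    ∀ (m : Nat), m ≤ a.length →
    (List.range m).foldl (fun pel i =>
        (List.range i).foldl (fun pel j =>
          if a.getD j 0 < a.getD i 0 then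
            pel.set i (max (pel.getD i 0) (pel.getD j 0 + 1))
          else pel) pel) (List.replicate a.length 1)
      = (dpList a).take m ++ List.replicate (a.length - m) 1 := by
  intro m
  induction m with
  | zero => simp
  | succ m ihm =>
    intro hm
    have hDlen : (dpList a).length = a.length := dpAux_length a []
    rw [List.range_succ, List.foldl_append, ihm (by omega)]
    simp only [List.foldl_cons, List.foldl_nil]
    set pel := (dpList a).take m ++ List.replicate (a.length - m) 1 with hpel
    have hlen : pel.length = a.length := by
      rw [hpel]; simp; omega
    have h1 : pel.getD m 0 = 1 := by
      rw [hpel, getD_append_right (by simp <;> omega)]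
      rw [getD_replicate (by simp <;> omega)]
    have hj : ∀ j, j < m → pel.getD j 0 = (dpList a).getD j 0 := by
      intro j hjm
      rw [hpel, getD_append_left (by simp <;> omega), getD_take hjm]
    rw [pel_inner a m m le_rfl (by omega) pel hlen h1 hj]
    have hval : maxUnder ((a.take m).zip ((dpList a).take m)) (a.getD m 0) + 1
        = (dpList a).getD m 0 := by
      have := dpAux_getD a [] m (by omega)
      simp only [List.nil_append] at this
      exact this.symm
    rw [hval, hpel]
    have hrep : List.replicate (a.length - m) (1 : Int)
        = 1 :: List.replicate (a.length - (m + 1)) 1 := by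
      have h2 : a.length - m = (a.length - (m + 1)) + 1 := by omega
      rw [h2, List.replicate_succ]
    have hlt : ((dpList a).take m).length = m := by simp; omega
    rw [hrep, set_append_len' _ _ _ _ m hlt.symm, take_succ_getD (by omega)]
    simp

-- the backward (res) loop nest
theorem res_inner (a : List Int) (i : Nat) (hi : i < a.length) :
    ∀ (m : Nat), i + 1 + m ≤ a.length → ∀ (res : List Int), res.length = a.length →
    res.getD i 0 = 1 →
    (∀ j, i < j → j < a.length →
        res.getD j 0 = (resSpec (a.drop (i + 1))).getD (j - (i + 1)) 0) →
    (List.range' (i + 1) m).foldl (fun res j =>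
        if a.getD i 0 < a.getD j 0 then
          res.set i (max (res.getD i 0) (res.getD j 0 + 1))
        else res) res
      = res.set i (maxOverGT (((a.drop (i + 1)).take m).zip
          ((resSpec (a.drop (i + 1))).take m)) (a.getD i 0) + 1) := by
  intro m
  induction m with
  | zero =>
    intro _ res hlen h1 _
    simp only [List.range', List.foldl_nil, List.take_zero, List.zip_nil_left]
    rw [maxOverGT, List.foldl_nil]
    exact (set_eq_self_of_getD (by omega) h1).symm
  | succ m ihm =>
    intro hm res hlen h1 hj
    have hSlen : (resSpec (a.drop (i + 1))).length = a.length - (i + 1) := by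
      rw [resSpec_length]; simp
    have hmS : m < (resSpec (a.drop (i + 1))).length := by omega
    have hmd : m < (a.drop (i + 1)).length := by simp; omega
    rw [List.range'_1_concat, List.foldl_append, ihm (by omega) res hlen h1 hj]
    simp only [List.foldl_cons, List.foldl_nil]
    have hgj : (res.set i (maxOverGT (((a.drop (i + 1)).take m).zip
          ((resSpec (a.drop (i + 1))).take m)) (a.getD i 0) + 1)).getD (i + 1 + m) 0
        = (resSpec (a.drop (i + 1))).getD m 0 := by
      rw [getD_set_ne (by omega), hj (i + 1 + m) (by omega) (by omega)]
      congr 1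
      omega
    have hgi : (res.set i (maxOverGT (((a.drop (i + 1)).take m).zip
          ((resSpec (a.drop (i + 1))).take m)) (a.getD i 0) + 1)).getD i 0
        = maxOverGT (((a.drop (i + 1)).take m).zip
          ((resSpec (a.drop (i + 1))).take m)) (a.getD i 0) + 1 := getD_set_self (by omega) _ _
    have hzip : ((a.drop (i + 1)).take (m + 1)).zip ((resSpec (a.drop (i + 1))).take (m + 1))
        = ((a.drop (i + 1)).take m).zip ((resSpec (a.drop (i + 1))).take m)
          ++ [((a.drop (i + 1)).getD m 0, (resSpec (a.drop (i + 1))).getD m 0)] := by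
      rw [take_succ_getD hmd, take_succ_getD hmS]
      rw [List.zip_append (by simp <;> omega)]
      rfl
    have hpos : 1 ≤ (resSpec (a.drop (i + 1))).getD m 0 :=
      resSpec_pos _ m (by simp <;> omega)
    have hnn : 0 ≤ maxOverGT (((a.drop (i + 1)).take m).zip
        ((resSpec (a.drop (i + 1))).take m)) (a.getD i 0) := by
      rw [maxOverGT_eq_fmax]
      exact fmax_nonneg _ _
    have haj : a.getD (i + 1 + m) 0 = (a.drop (i + 1)).getD m 0 := (getD_drop _ _).symm
    by_cases hc : a.getD i 0 < a.getD (i + 1 + m) 0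
    · have hc' : a.getD i 0 < (a.drop (i + 1)).getD m 0 := haj ▸ hc
      rw [if_pos hc, hgj, hgi, List.set_set, hzip, maxOverGT_append, maxOverGT_single, if_pos hc']
      exact congrArg (List.set res i) (by omega)
    · have hc' : ¬ a.getD i 0 < (a.drop (i + 1)).getD m 0 := haj ▸ hc
      rw [if_neg hc, hzip, maxOverGT_append, maxOverGT_single, if_neg hc']
      exact congrArg (List.set res i) (by omega)

theorem res_outer (a : List Int) :
    ∀ (m : Nat), m ≤ a.length → ∀ (res : List Int),
    res = List.replicate m 1 ++ resSpec (a.drop m) →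
    ((List.range m).reverse).foldl (fun res i =>
        (List.range' i (a.length - i)).foldl (fun res j =>
          if a.getD i 0 < a.getD j 0 then
            res.set i (max (res.getD i 0) (res.getD j 0 + 1))
          else res) res) res
      = resSpec a := by
  intro m
  induction m with
  | zero =>
    intro _ res hres
    simpa using hres
  | succ m ihm =>
    intro hm res hres
    have hrev : (List.range (m + 1)).reverse = m :: (List.range m).reverse := by
      rw [List.range_succ]; simp
    rw [hrev]
    simp only [List.foldl_cons]
    apply ihm (by omega)
    -- one outer iteration at index m turns the state for m+1 into the state for m
    have hdropm : a.drop m = a.getD m 0 :: a.drop (m + 1) := by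
      rw [List.drop_eq_getElem_cons (by omega), getD_of_lt (by omega)]
    have hrange : List.range' m (a.length - m) = m :: List.range' (m + 1) (a.length - (m + 1)) := by
      have h2 : a.length - m = (a.length - (m + 1)) + 1 := by omega
      rw [h2, List.range'_succ]
    rw [hrange]
    simp only [List.foldl_cons]
    rw [if_neg (lt_irrefl _)]
    have hlen : res.length = a.length := by
      rw [hres]; simp [resSpec_length]; omega
    have h1 : res.getD m 0 = 1 := by
      rw [hres, getD_append_left (by simp <;> omega)]
      rw [getD_replicate (by omega)]
    have hj : ∀ j, m < j → j < a.length →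
        res.getD j 0 = (resSpec (a.drop (m + 1))).getD (j - (m + 1)) 0 := by
      intro j h1j h2j
      rw [hres, getD_append_right (by simp <;> omega)]
      congr 1
      simp
    rw [res_inner a m (by omega) (a.length - (m + 1)) (by omega) res hlen h1 hj]
    have htake1 : (a.drop (m + 1)).take (a.length - (m + 1)) = a.drop (m + 1) := by
      apply List.take_of_length_le
      simp
    have htake2 : (resSpec (a.drop (m + 1))).take (a.length - (m + 1))
        = resSpec (a.drop (m + 1)) := by
      apply List.take_of_length_le
      rw [resSpec_length]
      simp
    rw [htake1, htake2, hres]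
    have hrep : List.replicate (m + 1) (1 : Int) = List.replicate m 1 ++ [1] := by
      rw [List.replicate_succ']
    have hlrep : (List.replicate m (1 : Int)).length = m := by simp
    rw [hrep, List.append_assoc, List.singleton_append]
    rw [set_append_len' _ _ _ _ m hlrep.symm, hdropm]
    simp only [resSpec]

-- the final loop
theorem final_loop (pel res : List Int) (hlen : pel.length = res.length) :
    ∀ (m : Nat), m ≤ pel.length →
    (List.range m).foldl (fun pel i => pel.set i (pel.getD i 0 + res.getD i 0 - 1)) pel
      = List.zipWith (fun l r => l + r - 1) (pel.take m) (res.take m) ++ pel.drop m := by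
  intro m
  induction m with
  | zero => simp
  | succ m ihm =>
    intro hm
    rw [List.range_succ, List.foldl_append, ihm (by omega)]
    simp only [List.foldl_cons, List.foldl_nil]
    have hZlen : (List.zipWith (fun l r => l + r - 1) (pel.take m) (res.take m)).length = m := by
      simp; omega
    have hdropm : pel.drop m = pel.getD m 0 :: pel.drop (m + 1) := by
      rw [List.drop_eq_getElem_cons (by omega), getD_of_lt (by omega)]
    have hg : (List.zipWith (fun l r => l + r - 1) (pel.take m) (res.take m)
        ++ pel.drop m).getD m 0 = pel.getD m 0 := by
      rw [getD_append_right (by omega), hdropm]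
      simp [hZlen, List.getD]
    rw [hg, hdropm, set_append_len' _ _ _ _ m hZlen.symm]
    rw [take_succ_getD (by omega), take_succ_getD (by omega)]
    rw [List.zipWith_append (by simp <;> omega)]
    simp

-- right side of B equals resSpec
theorem dpAux_snoc (l : List Int) : ∀ (acc : List (Int × Int)) (y : Int),
    dpAux (l ++ [y]) acc
      = dpAux l acc ++ [maxUnder (acc ++ l.zip (dpAux l acc)) y + 1] := by
  induction l with
  | nil => intro acc y; simp [dpAux]
  | cons x xs ih =>
    intro acc y
    have hx : dpAux ((x :: xs) ++ [y]) acc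
        = (maxUnder acc x + 1) :: dpAux (xs ++ [y]) (acc ++ [(x, maxUnder acc x + 1)]) := rfl
    rw [hx, ih]
    have hx2 : dpAux (x :: xs) acc
        = (maxUnder acc x + 1) :: dpAux xs (acc ++ [(x, maxUnder acc x + 1)]) := rfl
    rw [hx2]
    simp [List.append_assoc]

theorem fmax_congr (c c' : Int × Int → Bool) {l : List (Int × Int)}
    (h : ∀ p ∈ l, c p = c' p) : fmax c l = fmax c' l := by
  induction l with
  | nil => rfl
  | cons p l ih =>
    rw [fmax_cons, fmax_cons, h p (by simp), ih (fun q hq => h q (List.mem_cons_of_mem _ hq))]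

theorem zip_reverse (l₁ l₂ : List Int) (h : l₁.length = l₂.length) :
    l₁.reverse.zip l₂.reverse = (l₁.zip l₂).reverse := by
  induction l₁ generalizing l₂ with
  | nil => simp
  | cons x xs ih =>
    cases l₂ with
    | nil => simp at h
    | cons y ys =>
      have h' : xs.length = ys.length := by simpa using h
      simp only [List.reverse_cons, List.zip_cons_cons]
      rw [List.zip_append (by simp [h']), ih ys h']
      simp

theorem zip_map_neg (l₁ l₂ : List Int) :
    (l₁.map (fun v => -v)).zip l₂ = (l₁.zip l₂).map (fun p => (-p.1, p.2)) := by
  induction l₁ generalizing l₂ with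
  | nil => simp
  | cons x xs ih =>
    cases l₂ with
    | nil => simp
    | cons y ys => simp [ih]

theorem revneg_eq_resSpec (a : List Int) :
    dpList (a.reverse.map (fun x => -x)) = (resSpec a).reverse := by
  induction a with
  | nil => simp [dpList, dpAux, resSpec]
  | cons x xs ih =>
    have hlen : (resSpec xs).length = xs.length := resSpec_length xs
    rw [List.reverse_cons, List.map_append]
    simp only [List.map_cons, List.map_nil]
    rw [dpList, dpAux_snoc, ← dpList, ih]
    rw [resSpec, List.reverse_cons]
    congr 1
    congr 1
    simp only [List.nil_append]
    have h1 : xs.reverse.map (fun x => -x) = (xs.map (fun x => -x)).reverse := by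
      rw [List.map_reverse]
    rw [h1, zip_reverse _ _ (by simp [hlen])]
    rw [maxUnder_eq_fmax, fmax_reverse]
    rw [zip_map_neg xs (resSpec xs)]
    rw [fmax_map _ (fun p => (-p.1, p.2)) (fun p => rfl)]
    rw [maxOverGT_eq_fmax]
    congr 1
    apply fmax_congr
    intro p _
    have hp : ((-p.1, p.2) : Int × Int).1 = -p.1 := rfl
    rw [hp]
    simp only [decide_eq_decide]
    omega

-- assembling both ports
theorem subseqcres_eq (a : List Int) :
    subseqcres a = List.zipWith (fun l r => l + r - 1) (dpList a) (resSpec a) := by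
  have hDlen : (dpList a).length = a.length := dpAux_length a []
  have hRlen : (resSpec a).length = a.length := resSpec_length a
  have hres : (List.range a.length).reverse.foldl (fun res i =>
      (List.range' i (a.length - i)).foldl (fun res j =>
        if a.getD i 0 < a.getD j 0 then
          res.set i (max (res.getD i 0) (res.getD j 0 + 1))
        else res) res) (List.replicate a.length 1) = resSpec a := by
    apply res_outer a a.length le_rfl
    simp [resSpec]
  have hpel : (List.range a.length).foldl (fun pel i =>
      (List.range i).foldl (fun pel j =>
        if a.getD j 0 < a.getD i 0 then
          pel.set i (max (pel.getD i 0) (pel.getD j 0 + 1))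
        else pel) pel) (List.replicate a.length 1) = dpList a := by
    rw [pel_outer a a.length le_rfl]
    simp [List.take_of_length_le (le_of_eq hDlen)]
  have hstart : subseqcres a = (List.range a.length).foldl
      (fun pel i => pel.set i (pel.getD i 0 +
        ((List.range a.length).reverse.foldl (fun res i =>
          (List.range' i (a.length - i)).foldl (fun res j =>
            if a.getD i 0 < a.getD j 0 then
              res.set i (max (res.getD i 0) (res.getD j 0 + 1))
            else res) res) (List.replicate a.length 1)).getD i 0 - 1))
      ((List.range a.length).foldl (fun pel i =>
        (List.range i).foldl (fun pel j =>
          if a.getD j 0 < a.getD i 0 then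
            pel.set i (max (pel.getD i 0) (pel.getD j 0 + 1))
          else pel) pel) (List.replicate a.length 1)) := rfl
  rw [hstart, hres, hpel]
  have hfin := final_loop (dpList a) (resSpec a) (by omega) a.length (by omega)
  rw [hfin]
  simp [List.take_of_length_le (le_of_eq hDlen), List.take_of_length_le (le_of_eq hRlen),
    List.drop_of_length_le (le_of_eq hDlen)]

theorem subseqcres_alt_eq (a : List Int) :
    subseqcres_alt a = List.zipWith (fun l r => l + r - 1) (dpList a) (resSpec a) := by
  rw [subseqcres_alt]
  simp only [lisEnd_eq_dpList, revneg_eq_resSpec, List.reverse_reverse]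

theorem subseqcres_spec : Claim_equal_subseqcres := by
  intro array _
  unfold Spec_subseqcres
  rw [subseqcres_eq, subseqcres_alt_eq]
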